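-- pv_equiv track=rewrite | github.com/ditsarl/ussdrouter | ussdrouting.py | goBack
-- ===== SOURCE A (Python) =====
-- def goBack(str, keyword='00'):
--
--   strArray = str.split('*')
--   newStrArray = []
--
--   for i in range(len(strArray)):
--
--     if strArray[i] == keyword:
--         newStrArray = newStrArray[slice(0, -1)]
--     else:
--         newStrArray.append(strArray[i])
--
--   return "*".join(newStrArray)
-- ===== SOURCE B (Python) =====
-- def goBack(str, keyword='00'):
--     out = []
--     skip = 0
--     for tok in reversed(str.split('*')):
--         if tok == keyword:
--             skip += 1
--         elif skip:
--             skip -= 1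
--         else:
--             out.append(tok)
--     out.reverse()
--     return '*'.join(out)
-- ===== Notes on version B (the rewrite author's own statement) =====
-- stated objective: alternative
-- what changed: Replaces the forward pass with an explicit stack (slice-copy pops) by a single reverse pass keeping an integer counter of pending deletions, collecting survivors and reversing once at the end.
import Mathlib
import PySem

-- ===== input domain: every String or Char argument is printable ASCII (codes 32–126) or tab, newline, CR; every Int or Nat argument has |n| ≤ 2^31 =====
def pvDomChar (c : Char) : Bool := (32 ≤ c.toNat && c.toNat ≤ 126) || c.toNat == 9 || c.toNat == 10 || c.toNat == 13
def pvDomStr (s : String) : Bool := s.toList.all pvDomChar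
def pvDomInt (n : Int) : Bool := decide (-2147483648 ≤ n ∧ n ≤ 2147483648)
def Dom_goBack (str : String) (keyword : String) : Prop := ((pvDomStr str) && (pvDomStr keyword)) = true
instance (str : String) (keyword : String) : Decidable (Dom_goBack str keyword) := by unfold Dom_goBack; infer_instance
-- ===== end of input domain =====

-- B replaces A's forward pass with slice-copy stack pops by a reverse pass with a pending-deletion counter (alternative decomposition).

-- ===== PORT A =====
def goBack (str : String) (keyword : String) : String :=
  let strArray := (PySem.Str.split? str "*").getD []
  let newStrArray :=
    (PySem.List.pyRange 0 (PySem.List.len strArray) 1).foldl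
      (fun acc i =>
        if PySem.List.pyGetD strArray i "" = keyword then
          PySem.List.slice acc (some 0) (some (-1))
        else
          acc ++ [PySem.List.pyGetD strArray i ""]) []
  PySem.Str.join "*" newStrArray

-- ===== PORT B =====
def goBack_alt (str : String) (keyword : String) : String :=
  let toks := (PySem.Str.split? str "*").getD []
  let st :=
    toks.reverse.foldl
      (fun (st : List String × Int) tok =>
        if tok = keyword then (st.1, st.2 + 1)
        else if st.2 ≠ 0 then (st.1, st.2 - 1)
        else (st.1 ++ [tok], st.2)) ([], 0)
  PySem.Str.join "*" st.1.reverse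

-- ===== PRECONDITION & SPEC =====
def Spec_goBack (str : String) (keyword : String) (out : String) : Prop := out = goBack_alt str keyword
instance (str : String) (keyword : String) (out : String) : Decidable (Spec_goBack str keyword out) := by unfold Spec_goBack; infer_instance

-- ===== CLAIM (what is proved, stated in full; the proofs are below) =====
def Claim_equal_goBack : Prop := ∀ (str : String) (keyword : String), Dom_goBack str keyword → Spec_goBack str keyword (goBack str keyword)

-- ===== LEMMAS AND PROOFS =====

-- A's step: stack pop / push
def pvStepA (keyword : String) (acc : List String) (t : String) : List String :=
  if t = keyword then acc.dropLast else acc ++ [t]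

-- direct-recursion model of B's reverse pass (output in traversal order, counter as Nat)
def pvG (keyword : String) : List String → Nat → List String
  | [], _ => []
  | t :: ts, k =>
    if t = keyword then pvG keyword ts (k + 1)
    else match k with
      | 0 => t :: pvG keyword ts 0
      | m + 1 => pvG keyword ts m

-- iterated dropLast
def pvIterDrop : Nat → List String → List String
  | 0, x => x
  | k + 1, x => pvIterDrop k x.dropLast

lemma pvA_foldl_list (keyword : String) (toks : List String) :
    (PySem.List.pyRange 0 (PySem.List.len toks) 1).foldl
      (fun acc i =>
        if PySem.List.pyGetD toks i "" = keyword then PySem.List.slice acc (some 0) (some (-1))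
        else acc ++ [PySem.List.pyGetD toks i ""]) []
    = toks.foldl (pvStepA keyword) [] := by
  rw [PySem.List.foldl_pyRange_zero_pyGetD toks ""
      (fun acc t => if t = keyword then PySem.List.slice acc (some 0) (some (-1)) else acc ++ [t]) []]
  refine PySem.List.foldl_congr_mem _ _ _ _ (fun acc t _ => ?_)
  simp [pvStepA, PySem.List.slice_zero_start, PySem.List.slice_to_neg_one]

-- B's fold over the reversed list computes pvG (appended to the accumulator), with the Int counter a Nat cast
lemma pvB_foldl (keyword : String) (r : List String) :
    ∀ (out : List String) (k : Nat),
    (r.foldl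
      (fun (st : List String × Int) tok =>
        if tok = keyword then (st.1, st.2 + 1)
        else if st.2 ≠ 0 then (st.1, st.2 - 1)
        else (st.1 ++ [tok], st.2)) (out, (k : Int))).1
    = out ++ pvG keyword r k := by
  induction r with
  | nil => intro out k; simp [pvG]
  | cons t ts ih =>
    intro out k
    rw [List.foldl_cons]
    by_cases h : t = keyword
    · rw [if_pos h, show ((k : Int) + 1) = ((k + 1 : Nat) : Int) by push_cast; ring, ih]
      simp [pvG, h]
    · rw [if_neg h]
      cases k with
      | zero =>
        rw [if_neg (by simp), ih]
        simp [pvG, h]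
      | succ m =>
        rw [if_pos (by positivity),
          show ((m + 1 : Nat) : Int) - 1 = ((m : Nat) : Int) by push_cast; ring, ih]
        simp [pvG, h]

-- core correspondence, induction over the reversed list
lemma pvG_eq_iterDrop (keyword : String) (r : List String) :
    ∀ (k : Nat), (pvG keyword r k).reverse = pvIterDrop k (r.reverse.foldl (pvStepA keyword) []) := by
  induction r with
  | nil => intro k; induction k with
    | zero => simp [pvG, pvIterDrop]
    | succ m ihm => simpa [pvG, pvIterDrop] using ihm
  | cons t ts ih =>
    intro k
    have hfold : (t :: ts).reverse.foldl (pvStepA keyword) []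
        = pvStepA keyword (ts.reverse.foldl (pvStepA keyword) []) t := by
      simp [List.foldl_append]
    by_cases h : t = keyword
    · have : pvStepA keyword (ts.reverse.foldl (pvStepA keyword) []) t
          = (ts.reverse.foldl (pvStepA keyword) []).dropLast := by simp [pvStepA, h]
      rw [hfold, this]
      show (pvG keyword (t :: ts) k).reverse = pvIterDrop k _
      have hG : pvG keyword (t :: ts) k = pvG keyword ts (k + 1) := by simp [pvG, h]
      rw [hG, ih (k + 1)]
      rfl
    · cases k with
      | zero =>
        have hG : pvG keyword (t :: ts) 0 = t :: pvG keyword ts 0 := by simp [pvG, h]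
        rw [hfold, hG]
        simp only [List.reverse_cons, ih 0, pvIterDrop, pvStepA, if_neg h]
      | succ m =>
        have hG : pvG keyword (t :: ts) (m + 1) = pvG keyword ts m := by simp [pvG, h]
        rw [hfold, hG, ih m]
        show pvIterDrop m _ = pvIterDrop (m + 1) (pvStepA keyword _ t)
        show pvIterDrop m _ = pvIterDrop m (pvStepA keyword _ t).dropLast
        simp [pvStepA, if_neg h]

-- full correspondence for an arbitrary token list
lemma pvMain (keyword : String) (toks : List String) :
    PySem.Str.join "*"
      ((PySem.List.pyRange 0 (PySem.List.len toks) 1).foldl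
        (fun acc i =>
          if PySem.List.pyGetD toks i "" = keyword then PySem.List.slice acc (some 0) (some (-1))
          else acc ++ [PySem.List.pyGetD toks i ""]) [])
    = PySem.Str.join "*"
        ((toks.reverse.foldl
          (fun (st : List String × Int) tok =>
            if tok = keyword then (st.1, st.2 + 1)
            else if st.2 ≠ 0 then (st.1, st.2 - 1)
            else (st.1 ++ [tok], st.2)) ([], 0)).1.reverse) := by
  rw [pvA_foldl_list]
  have hb := pvB_foldl keyword toks.reverse [] 0
  simp only [Int.natCast_zero] at hb
  rw [hb]
  have hg := pvG_eq_iterDrop keyword toks.reverse 0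
  simp only [List.reverse_reverse, pvIterDrop] at hg
  simp [hg]

-- ===== VERDICT (by name: the statement is the Claim_ definition above) =====
theorem goBack_spec : Claim_equal_goBack := by
  intro str keyword _
  show goBack str keyword = goBack_alt str keyword
  exact pvMain keyword ((PySem.Str.split? str "*").getD [])
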